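-- pv_equiv track=rewrite | github.com/drinkwater0502/8-puzzle-solver | 8puzzle.py | check_legal_moves
-- ===== SOURCE A (Python) =====
-- def find_coordinates(grid, target):
--     for i in range(len(grid)):
--         for j in range(len(grid[i])):
--             if grid[i][j] == target:
--                 return (i, j)
--
-- def is_adjacent(pos1, pos2):
--     # Check if two positions are adjacent
--     x1, y1 = pos1
--     x2, y2 = pos2
--     return abs(x1 - x2) + abs(y1 - y2) == 1
--
-- def get_direction(from_pos, to_pos):
--     # Determine the direction from one position to another
--     x1, y1 = from_pos
--     x2, y2 = to_pos
--
--     if x1 < x2: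
--         return "down"
--     elif x1 > x2:
--         return "up"
--     elif y1 < y2:
--         return "right"
--     elif y1 > y2:
--         return "left"
--
-- def check_legal_moves(grid):
--     legal_moves = []
--     b_position = find_coordinates(grid, 'b')
--     for i in range(len(grid)):
--         for j in range(len(grid[i])):
--             if grid[i][j] != 'b':
--                 if is_adjacent(b_position, (i, j)):
--                     legal_moves.append(get_direction(b_position, (i, j)))
--
--     return legal_moves
-- ===== SOURCE B (Python) =====
-- def check_legal_moves(grid):
--     # locate the first blank in scan order
--     bi = bj = None
--     for i, row in enumerate(grid):
--         if 'b' in row: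
--             bi, bj = i, row.index('b')
--             break
--     legal_moves = []
--     # probe the 4 neighbors directly, in A's scan order: up, left, right, down
--     for name, ni, nj in (("up", bi - 1, bj), ("left", bi, bj - 1),
--                          ("right", bi, bj + 1), ("down", bi + 1, bj)):
--         if 0 <= ni < len(grid) and 0 <= nj < len(grid[ni]) and grid[ni][nj] != 'b':
--             legal_moves.append(name)
--     return legal_moves
-- ===== Notes on version B (the rewrite author's own statement) =====
-- stated objective: faster
-- what changed: B finds the blank's row directly and probes only its 4 neighbor cells (up,left,right,down) in A's emission order, instead of A's full second scan of every cell testing adjacency against the blank.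
-- outside the precondition, e.g. on check_legal_moves([]): A returns [], B raises TypeError; on check_legal_moves([[]]): A returns [], B raises TypeError
import Mathlib
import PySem

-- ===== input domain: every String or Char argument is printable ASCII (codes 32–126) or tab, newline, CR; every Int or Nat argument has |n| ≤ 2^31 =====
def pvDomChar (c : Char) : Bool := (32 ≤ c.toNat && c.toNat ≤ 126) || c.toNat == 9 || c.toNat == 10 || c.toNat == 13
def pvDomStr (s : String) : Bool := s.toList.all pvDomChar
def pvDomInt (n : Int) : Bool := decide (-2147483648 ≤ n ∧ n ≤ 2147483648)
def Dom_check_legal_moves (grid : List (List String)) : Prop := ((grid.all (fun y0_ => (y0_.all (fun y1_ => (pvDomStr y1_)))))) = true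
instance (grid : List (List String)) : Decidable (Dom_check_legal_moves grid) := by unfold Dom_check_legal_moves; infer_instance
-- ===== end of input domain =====

-- B replaces A's adjacency scan of the whole grid by a direct probe of the blank's 4 neighbors (faster).

-- ===== PORT A =====
-- inner j-loop of find_coordinates, as a helper (early return modeled by the Option accumulator)
def fc_row (row : List String) (target : String) (i : Int) (acc : Option (Int × Int)) : Option (Int × Int) :=
  (PySem.List.pyRange 0 (row.length : Int)).foldl
    (fun acc2 j =>
      match acc2 with
      | some p => some p
      | none => if PySem.List.pyGetD row j "" = target then some (i, j) else none) acc

def find_coordinates (grid : List (List String)) (target : String) : Option (Int × Int) :=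
  (PySem.List.pyRange 0 (grid.length : Int)).foldl
    (fun acc i => fc_row (PySem.List.pyGetD grid i []) target i acc) none

def is_adjacent (pos1 pos2 : Int × Int) : Bool :=
  (pos1.1 - pos2.1).natAbs + (pos1.2 - pos2.2).natAbs == 1

def get_direction (from_pos to_pos : Int × Int) : String :=
  if from_pos.1 < to_pos.1 then "down"
  else if to_pos.1 < from_pos.1 then "up"
  else if from_pos.2 < to_pos.2 then "right"
  else if to_pos.2 < from_pos.2 then "left"
  else ""  -- Python falls through returning None here; never reached on adjacent positions

def check_legal_moves (grid : List (List String)) : List String :=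
  match find_coordinates grid "b" with
  | none => []  -- Python raises TypeError here (unpacking None); excluded by Pre_
  | some bpos =>
    (PySem.List.pyRange 0 (grid.length : Int)).foldl
      (fun acc i =>
        (PySem.List.pyRange 0 ((PySem.List.pyGetD grid i []).length : Int)).foldl
          (fun acc2 j =>
            if PySem.List.pyGetD (PySem.List.pyGetD grid i []) j "" ≠ "b" then
              if is_adjacent bpos (i, j) then acc2 ++ [get_direction bpos (i, j)] else acc2
            else acc2) acc) []

-- ===== PORT B =====
def find_blank : List (List String) → Int → Option (Int × Int)
  | [], _ => none
  | row :: rest, i =>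
    if row.contains "b" then some (i, (((PySem.List.index? row "b").getD 0 : Nat) : Int))
    else find_blank rest (i + 1)

def neighbor_ok (grid : List (List String)) (ni nj : Int) : Bool :=
  decide (0 ≤ ni) && decide (0 ≤ nj) &&
    (match PySem.List.pyGet? grid ni with
     | none => false
     | some row =>
       match PySem.List.pyGet? row nj with
       | none => false
       | some c => c ≠ "b")

def check_legal_moves_alt (grid : List (List String)) : List String :=
  match find_blank grid 0 with
  | none => []  -- B's Python raises TypeError here too; excluded by Pre_
  | some (bi, bj) =>
    [("up", bi - 1, bj), ("left", bi, bj - 1), ("right", bi, bj + 1), ("down", bi + 1, bj)].foldl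
      (fun acc m => if neighbor_ok grid m.2.1 m.2.2 then acc ++ [m.1] else acc) []

-- ===== PRECONDITION & SPEC =====
-- Pre_ excludes the grids with no 'b' cell: on those Python A raises TypeError (unpacking None) whenever some cell
-- exists, and returns [] only on degenerate grids with no cells at all (empty scan), where B naturally raises too.
def Pre_check_legal_moves (grid : List (List String)) : Prop :=
  (grid.any (fun row => row.contains "b")) = true
instance (grid : List (List String)) : Decidable (Pre_check_legal_moves grid) := by
  unfold Pre_check_legal_moves; infer_instance

def pvWitness_check_legal_moves : List (List String) := [["1", "b"], ["2", "3"]]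

def Spec_check_legal_moves (grid : List (List String)) (out : List String) : Prop := out = check_legal_moves_alt grid
instance (grid : List (List String)) (out : List String) : Decidable (Spec_check_legal_moves grid out) := by unfold Spec_check_legal_moves; infer_instance

-- ===== CLAIM (what is proved, stated in full; the proofs are below) =====
def Claim_equal_check_legal_moves : Prop := ∀ (grid : List (List String)), Dom_check_legal_moves grid → Pre_check_legal_moves grid → Spec_check_legal_moves grid (check_legal_moves grid)

-- ===== LEMMAS AND PROOFS =====

def scanIdx {α β : Type} (g : Int → α → Option β) : List α → Int → Option β
  | [], _ => none
  | a :: rest, i =>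
    match g i a with
    | some p => some p
    | none => scanIdx g rest (i + 1)

theorem foldl_opt {α β : Type} (g : Option β → α → Option β) (f : α → Option β)
    (h1 : ∀ p x, g (some p) x = some p) (h2 : ∀ x, g none x = f x) (l : List α) (acc : Option β) :
    l.foldl g acc = match acc with | some p => some p | none => l.findSome? f := by
  induction l generalizing acc with
  | nil => cases acc <;> simp
  | cons a l ih =>
    cases acc with
    | some p => rw [List.foldl_cons, h1]; exact ih (some p)
    | none =>
      rw [List.foldl_cons, List.findSome?_cons, h2]
      cases h : f a with
      | none => rw [ih none]
      | some p => rw [ih (some p)]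

theorem findSome?_pyRange {α β : Type} (xs : List α) (d : α) (g : Int → α → Option β) :
    ∀ (n k : Nat), k + n = xs.length →
      (PySem.List.pyRange (k : Int) (xs.length : Int)).findSome? (fun i => g i (PySem.List.pyGetD xs i d))
        = scanIdx g (xs.drop k) (k : Int) := by
  intro n
  induction n with
  | zero =>
    intro k hk
    have h1 : PySem.List.pyRange (k : Int) (xs.length : Int) = [] := by
      rw [List.eq_nil_iff_forall_not_mem]
      intro x hx
      rw [PySem.List.mem_pyRange_one] at hx
      omega
    have h2 : xs.drop k = [] := by
      apply List.drop_eq_nil_of_le; omega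
    simp [h1, h2, scanIdx]
  | succ n ih =>
    intro k hk
    have hlt : (k : Int) < (xs.length : Int) := by exact_mod_cast (by omega : k < xs.length)
    rw [PySem.List.pyRange_one_cons hlt]
    have hklen : k < xs.length := by omega
    have hdrop : xs.drop k = xs[k] :: xs.drop (k + 1) := List.drop_eq_getElem_cons hklen
    have hget : PySem.List.pyGetD xs (k : Int) d = xs[k] := by
      rw [PySem.List.pyGetD_natCast]
      exact List.getD_eq_getElem xs d hklen
    rw [List.findSome?_cons, hdrop]
    simp only [scanIdx, hget]
    cases h : g (k : Int) xs[k] with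
    | some p => simp
    | none =>
      simp only []
      have : ((k : Int) + 1) = ((k + 1 : Nat) : Int) := by push_cast; ring
      rw [this]
      exact ih (k + 1) (by omega)

theorem index?_cons (a : String) (l : List String) (t : String) :
    PySem.List.index? (a :: l) t = if a = t then some 0 else (PySem.List.index? l t).map (· + 1) := by
  simp only [PySem.List.index?, List.idxOf?_cons]
  by_cases h : a = t
  · simp [h]
  · simp [h]

theorem contains_eq_isSome (l : List String) (t : String) :
    (l.contains t) = (PySem.List.index? l t).isSome := by
  rw [Bool.eq_iff_iff]
  simp [PySem.List.index?, List.isSome_idxOf?]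

theorem scanIdx_row (t : String) (iIdx : Int) :
    ∀ (r : List String) (j0 : Nat),
      scanIdx (fun j c => if c = t then some (iIdx, j) else none) r (j0 : Int)
        = match PySem.List.index? r t with
          | none => none
          | some m => some (iIdx, ((j0 + m : Nat) : Int)) := by
  intro r
  induction r with
  | nil => intro j0; simp [scanIdx, PySem.List.index?]
  | cons a r ih =>
    intro j0
    rw [index?_cons]
    by_cases h : a = t
    · simp [scanIdx, h]
    · have h2 : ((j0 : Int) + 1) = ((j0 + 1 : Nat) : Int) := by push_cast; ring
      simp only [scanIdx, h, if_false]
      rw [h2, ih (j0 + 1)]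
      cases hm : PySem.List.index? r t with
      | none => simp
      | some m =>
        simp only [Option.map_some]
        congr 2
        omega

def rowFind (r : List String) (t : String) (i : Int) : Option (Int × Int) :=
  match PySem.List.index? r t with
  | none => none
  | some m => some (i, (m : Int))

theorem fc_row_none (r : List String) (t : String) (i : Int) :
    fc_row r t i none = rowFind r t i := by
  unfold fc_row
  rw [foldl_opt _ (fun j => if PySem.List.pyGetD r j "" = t then some (i, j) else none)
        (fun p x => rfl) (fun x => rfl)]
  have h0 : (0 : Int) = ((0 : Nat) : Int) := by norm_num
  have := findSome?_pyRange r "" (fun j c => if c = t then some (i, j) else none) r.length 0 (by omega)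
  simp only [Nat.cast_zero, List.drop_zero] at this
  rw [show (fun j => if PySem.List.pyGetD r j "" = t then some (i, j) else none)
        = (fun j => (fun j c => if c = t then some (i, j) else none) j (PySem.List.pyGetD r j "")) from rfl]
  rw [this]
  rw [show (0 : Int) = ((0 : Nat) : Int) from rfl]
  rw [scanIdx_row t i r 0]
  unfold rowFind
  cases hm : PySem.List.index? r t <;> simp

theorem fc_row_some (r : List String) (t : String) (i : Int) (p : Int × Int) :
    fc_row r t i (some p) = some p := by
  unfold fc_row
  rw [foldl_opt _ (fun j => if PySem.List.pyGetD r j "" = t then some (i, j) else none)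
        (fun p x => rfl) (fun x => rfl)]

theorem find_blank_eq_scan (rows : List (List String)) :
    ∀ (i : Int), find_blank rows i = scanIdx (fun i r => rowFind r "b" i) rows i := by
  induction rows with
  | nil => intro i; simp [find_blank, scanIdx]
  | cons r rest ih =>
    intro i
    simp only [find_blank, scanIdx]
    cases hm : PySem.List.index? r "b" with
    | none =>
      have hcf : r.contains "b" = false := by rw [contains_eq_isSome, hm]; rfl
      rw [hcf]
      simp only [Bool.false_eq_true, if_false, rowFind, hm]
      exact ih (i + 1)
    | some m =>
      have hct : r.contains "b" = true := by rw [contains_eq_isSome, hm]; rfl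
      rw [hct]
      simp only [if_true, rowFind, hm]
      simp

theorem find_eq (grid : List (List String)) :
    find_coordinates grid "b" = find_blank grid 0 := by
  unfold find_coordinates
  rw [foldl_opt _ (fun i => rowFind (PySem.List.pyGetD grid i []) "b" i)
        (fun p i => fc_row_some _ _ _ _) (fun i => fc_row_none _ _ _)]
  have := findSome?_pyRange grid [] (fun i r => rowFind r "b" i) grid.length 0 (by omega)
  simp only [Nat.cast_zero, List.drop_zero] at this
  rw [this, find_blank_eq_scan]

theorem pyRange_zero_succ (m : Nat) :
    PySem.List.pyRange 0 ((m + 1 : Nat) : Int) = PySem.List.pyRange 0 (m : Int) ++ [(m : Int)] := by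
  have : ((m + 1 : Nat) : Int) = (m : Int) + 1 := by push_cast; ring
  rw [this, PySem.List.pyRange_one_succ_right (by positivity)]

theorem filter_range_single (c : Int) (q : Int → Bool) (m : Nat) :
    (PySem.List.pyRange 0 (m : Int)).filter (fun j => decide (j = c) && q j)
      = if 0 ≤ c ∧ c < (m : Int) ∧ q c = true then [c] else [] := by
  induction m with
  | zero =>
    have h1 : PySem.List.pyRange 0 ((0:Nat) : Int) = [] := by
      rw [List.eq_nil_iff_forall_not_mem]
      intro x hx; rw [PySem.List.mem_pyRange_one] at hx; omega
    rw [h1]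
    split_ifs with h
    · omega
    · rfl
  | succ m ih =>
    rw [pyRange_zero_succ, List.filter_append, ih]
    have hfl : List.filter (fun j => decide (j = c) && q j) [(m : Int)]
        = if (m : Int) = c ∧ q c = true then [c] else [] := by
      by_cases hc : (m : Int) = c
      · subst hc
        by_cases hq : q (m : Int) = true
        · simp [hq]
        · simp [hq]
      · simp [hc]
    rw [hfl]
    split_ifs <;> simp_all <;> omega

theorem filter_range_pair (c1 c2 : Int) (h12 : c1 < c2) (q : Int → Bool) (m : Nat) :
    (PySem.List.pyRange 0 (m : Int)).filter (fun j => (decide (j = c1) || decide (j = c2)) && q j)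
      = (if 0 ≤ c1 ∧ c1 < (m : Int) ∧ q c1 = true then [c1] else [])
        ++ (if 0 ≤ c2 ∧ c2 < (m : Int) ∧ q c2 = true then [c2] else []) := by
  induction m with
  | zero =>
    have h1 : PySem.List.pyRange 0 ((0:Nat) : Int) = [] := by
      rw [List.eq_nil_iff_forall_not_mem]
      intro x hx; rw [PySem.List.mem_pyRange_one] at hx; omega
    rw [h1]
    split_ifs <;> first | rfl | omega
  | succ m ih =>
    rw [pyRange_zero_succ, List.filter_append, ih]
    have hfl : List.filter (fun j => (decide (j = c1) || decide (j = c2)) && q j) [(m : Int)]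
        = if ((m : Int) = c1 ∨ (m : Int) = c2) ∧ q (m : Int) = true then [(m : Int)] else [] := by
      by_cases hc : ((m : Int) = c1 ∨ (m : Int) = c2)
      · by_cases hq : q (m : Int) = true
        · rcases hc with hc | hc <;> subst hc <;> simp [hq]
        · rcases hc with hc | hc <;> subst hc <;> simp [hq]
      · push_neg at hc
        simp [hc.1, hc.2]
    rw [hfl]
    by_cases hd : ((m : Int) = c1 ∨ (m : Int) = c2) ∧ q (m : Int) = true
    · rw [if_pos hd]
      rcases hd with ⟨hc | hc, hq⟩ <;> subst hc <;> split_ifs <;> simp_all <;> omega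
    · rw [if_neg hd, List.append_nil]
      have e1 : (0 ≤ c1 ∧ c1 < ((m + 1 : Nat) : Int) ∧ q c1 = true) ↔ (0 ≤ c1 ∧ c1 < (m : Int) ∧ q c1 = true) := by
        constructor
        · rintro ⟨h0, h1, h2⟩
          refine ⟨h0, ?_, h2⟩
          by_cases hcm : c1 = (m : Int)
          · exact absurd (⟨Or.inl hcm.symm, hcm ▸ h2⟩ : ((m : Int) = c1 ∨ (m : Int) = c2) ∧ q (m : Int) = true) hd
          · push_cast at h1 ⊢; omega
        · rintro ⟨h0, h1, h2⟩
          refine ⟨h0, ?_, h2⟩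
          push_cast; omega
      have e2 : (0 ≤ c2 ∧ c2 < ((m + 1 : Nat) : Int) ∧ q c2 = true) ↔ (0 ≤ c2 ∧ c2 < (m : Int) ∧ q c2 = true) := by
        constructor
        · rintro ⟨h0, h1, h2⟩
          refine ⟨h0, ?_, h2⟩
          by_cases hcm : c2 = (m : Int)
          · exact absurd (⟨Or.inr hcm.symm, hcm ▸ h2⟩ : ((m : Int) = c1 ∨ (m : Int) = c2) ∧ q (m : Int) = true) hd
          · push_cast at h1 ⊢; omega
        · rintro ⟨h0, h1, h2⟩
          refine ⟨h0, ?_, h2⟩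
          push_cast; omega
      simp only [e1, e2]

theorem flatMap_range_three (h : Int → List String) (b : Int)
    (hz : ∀ i : Int, 0 ≤ i → i ≠ b - 1 → i ≠ b → i ≠ b + 1 → h i = []) (m : Nat) :
    (PySem.List.pyRange 0 (m : Int)).flatMap h
      = (if 0 ≤ b - 1 ∧ b - 1 < (m : Int) then h (b - 1) else [])
        ++ (if 0 ≤ b ∧ b < (m : Int) then h b else [])
        ++ (if 0 ≤ b + 1 ∧ b + 1 < (m : Int) then h (b + 1) else []) := by
  induction m with
  | zero =>
    have h1 : PySem.List.pyRange 0 ((0:Nat) : Int) = [] := by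
      rw [List.eq_nil_iff_forall_not_mem]
      intro x hx; rw [PySem.List.mem_pyRange_one] at hx; omega
    rw [h1]
    split_ifs <;> first | rfl | omega
  | succ m ih =>
    rw [pyRange_zero_succ, List.flatMap_append, ih]
    have hm0 : (0 : Int) ≤ (m : Int) := by positivity
    simp only [List.flatMap_cons, List.flatMap_nil, List.append_nil]
    by_cases h1 : (m : Int) = b - 1
    · have hL1 : ¬(0 ≤ b - 1 ∧ b - 1 < (m : Int)) := by omega
      have hL2 : ¬(0 ≤ b ∧ b < (m : Int)) := by omega
      have hL3 : ¬(0 ≤ b + 1 ∧ b + 1 < (m : Int)) := by omega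
      have hR1 : (0 ≤ b - 1 ∧ b - 1 < ((m + 1 : Nat) : Int)) := by omega
      have hR2 : ¬(0 ≤ b ∧ b < ((m + 1 : Nat) : Int)) := by omega
      have hR3 : ¬(0 ≤ b + 1 ∧ b + 1 < ((m + 1 : Nat) : Int)) := by omega
      rw [if_neg hL1, if_neg hL2, if_neg hL3, if_pos hR1, if_neg hR2, if_neg hR3, h1]
      simp
    · by_cases h2 : (m : Int) = b
      · have e1 : (0 ≤ b - 1 ∧ b - 1 < (m : Int)) ↔ (0 ≤ b - 1 ∧ b - 1 < ((m + 1 : Nat) : Int)) := by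
          constructor <;> rintro ⟨a, c⟩ <;> exact ⟨a, by omega⟩
        have hL2 : ¬(0 ≤ b ∧ b < (m : Int)) := by omega
        have hL3 : ¬(0 ≤ b + 1 ∧ b + 1 < (m : Int)) := by omega
        have hR2 : (0 ≤ b ∧ b < ((m + 1 : Nat) : Int)) := by omega
        have hR3 : ¬(0 ≤ b + 1 ∧ b + 1 < ((m + 1 : Nat) : Int)) := by omega
        simp only [e1]
        rw [if_neg hL2, if_neg hL3, if_pos hR2, if_neg hR3, h2]
        simp
      · by_cases h3 : (m : Int) = b + 1
        · have e1 : (0 ≤ b - 1 ∧ b - 1 < (m : Int)) ↔ (0 ≤ b - 1 ∧ b - 1 < ((m + 1 : Nat) : Int)) := by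
            constructor <;> rintro ⟨a, c⟩ <;> exact ⟨a, by omega⟩
          have e2 : (0 ≤ b ∧ b < (m : Int)) ↔ (0 ≤ b ∧ b < ((m + 1 : Nat) : Int)) := by
            constructor <;> rintro ⟨a, c⟩ <;> exact ⟨a, by omega⟩
          have hL3 : ¬(0 ≤ b + 1 ∧ b + 1 < (m : Int)) := by omega
          have hR3 : (0 ≤ b + 1 ∧ b + 1 < ((m + 1 : Nat) : Int)) := by omega
          simp only [e1, e2]
          rw [if_neg hL3, if_pos hR3, h3]
          simp
        · have e1 : (0 ≤ b - 1 ∧ b - 1 < (m : Int)) ↔ (0 ≤ b - 1 ∧ b - 1 < ((m + 1 : Nat) : Int)) := by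
            constructor <;> rintro ⟨a, c⟩ <;> exact ⟨a, by omega⟩
          have e2 : (0 ≤ b ∧ b < (m : Int)) ↔ (0 ≤ b ∧ b < ((m + 1 : Nat) : Int)) := by
            constructor <;> rintro ⟨a, c⟩ <;> exact ⟨a, by omega⟩
          have e3 : (0 ≤ b + 1 ∧ b + 1 < (m : Int)) ↔ (0 ≤ b + 1 ∧ b + 1 < ((m + 1 : Nat) : Int)) := by
            constructor <;> rintro ⟨a, c⟩ <;> exact ⟨a, by omega⟩
          simp only [e1, e2, e3]
          rw [hz (m : Int) hm0 h1 h2 h3]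
          simp

theorem find_blank_isSome (rows : List (List String)) (h : (rows.any (fun r => r.contains "b")) = true) :
    ∀ i : Int, (find_blank rows i).isSome := by
  induction rows with
  | nil => simp at h
  | cons r rest ih =>
    intro i
    simp only [find_blank]
    by_cases hc : r.contains "b" = true
    · have : "b" ∈ r := by simpa using hc
      simp [this]
    · simp only [List.any_cons, Bool.or_eq_true] at h
      rcases h with h | h
      · exact absurd h hc
      · simp only [hc, Bool.false_eq_true, if_false]
        exact ih h (i + 1)

theorem find_blank_shape :
    ∀ (rows : List (List String)) (k0 : Nat) (bi bj : Int),
      find_blank rows (k0 : Int) = some (bi, bj) →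
      ∃ (d kj : Nat) (row : List String),
        rows[d]? = some row ∧ bi = ((k0 + d : Nat) : Int) ∧ bj = (kj : Int)
          ∧ PySem.List.index? row "b" = some kj := by
  intro rows
  induction rows with
  | nil => intro k0 bi bj h; simp [find_blank] at h
  | cons r rest ih =>
    intro k0 bi bj h
    simp only [find_blank] at h
    by_cases hc : r.contains "b" = true
    · rw [hc] at h
      simp only [if_true, Option.some_inj] at h
      obtain ⟨h3, h4⟩ := Prod.mk_inj.mp h
      have hs : (PySem.List.index? r "b").isSome := by rw [← contains_eq_isSome]; exact hc
      obtain ⟨m, hm⟩ := Option.isSome_iff_exists.mp hs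
      refine ⟨0, m, r, by simp, ?_, ?_, hm⟩
      · rw [← h3]; norm_num
      · rw [← h4, hm]; rfl
    · simp only [hc, Bool.false_eq_true, if_false] at h
      have hcast : ((k0 : Int) + 1) = ((k0 + 1 : Nat) : Int) := by push_cast; ring
      rw [hcast] at h
      obtain ⟨d, kj, row, hrow, hbi, hbj, hidx⟩ := ih (k0 + 1) bi bj h
      refine ⟨d + 1, kj, row, by simpa using hrow, ?_, hbj, hidx⟩
      rw [hbi]; congr 1; omega

theorem two_if (C1 C2 : Prop) [Decidable C1] [Decidable C2] (g : Bool) (X : List String)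
    (h : g = true ↔ C1 ∧ C2) :
    (if C1 then (if C2 then X else []) else []) = (if g = true then X else []) := by
  by_cases h1 : C1 <;> by_cases h2 : C2 <;> simp [h1, h2, h]

theorem neighbor_ok_iff (grid : List (List String)) (ni nj : Int) :
    neighbor_ok grid ni nj = true
      ↔ (0 ≤ ni ∧ ni < (grid.length : Int)
          ∧ 0 ≤ nj ∧ nj < ((PySem.List.pyGetD grid ni []).length : Int)
          ∧ PySem.List.pyGetD (PySem.List.pyGetD grid ni []) nj "" ≠ "b") := by
  unfold neighbor_ok
  by_cases h1 : (0 : Int) ≤ ni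
  · by_cases h2 : (0 : Int) ≤ nj
    · obtain ⟨a, rfl⟩ : ∃ a : Nat, ni = (a : Int) := ⟨ni.toNat, (Int.toNat_of_nonneg h1).symm⟩
      obtain ⟨b, rfl⟩ : ∃ b : Nat, nj = (b : Int) := ⟨nj.toNat, (Int.toNat_of_nonneg h2).symm⟩
      rw [PySem.List.pyGet?_natCast]
      by_cases ha : a < grid.length
      · have hga : grid[(a : Nat)]? = some grid[a] := List.getElem?_eq_getElem ha
        have hgd : PySem.List.pyGetD grid (a : Int) [] = grid[a] := by
          rw [PySem.List.pyGetD_natCast]; exact List.getD_eq_getElem grid [] ha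
        rw [hga, hgd]
        simp only [PySem.List.pyGet?_natCast]
        by_cases hb : b < grid[a].length
        · have hgb : grid[a][(b : Nat)]? = some grid[a][b] := List.getElem?_eq_getElem hb
          have hgdb : PySem.List.pyGetD grid[a] (b : Int) "" = grid[a][b] := by
            rw [PySem.List.pyGetD_natCast]; exact List.getD_eq_getElem grid[a] "" hb
          rw [hgb, hgdb]
          simp only [h1, h2, decide_true, Bool.true_and]
          constructor
          · intro hx
            refine ⟨trivial, by exact_mod_cast ha, trivial, by exact_mod_cast hb, by simpa using hx⟩
          · rintro ⟨-, -, -, -, hx⟩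
            simpa using hx
        · have hgb : grid[a][(b : Nat)]? = none := by
            rw [List.getElem?_eq_none_iff]; omega
          rw [hgb]
          simp only [Bool.and_false]
          constructor
          · intro hx; simp at hx
          · rintro ⟨-, -, -, hx, -⟩
            exfalso
            have : (b : Int) < (grid[a].length : Int) := hx
            exact hb (by exact_mod_cast this)
      · have hga : grid[(a : Nat)]? = none := by
          rw [List.getElem?_eq_none_iff]; omega
        rw [hga]
        simp only [Bool.and_false]
        constructor
        · intro hx; simp at hx
        · rintro ⟨-, hx, -⟩
          exact absurd (by exact_mod_cast hx : a < grid.length) ha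
    · constructor
      · intro hx; rw [decide_eq_false h2] at hx; simp at hx
      · rintro ⟨-, -, hx, -⟩; exact absurd hx h2
  · constructor
    · intro hx; rw [decide_eq_false h1] at hx; simp at hx
    · rintro ⟨hx, -⟩; exact absurd hx h1

-- direction values of get_direction at the four neighbours
theorem dir_up (bi bj : Int) : get_direction (bi, bj) (bi - 1, bj) = "up" := by
  unfold get_direction
  rw [if_neg (by simp), if_pos (by simp)]

theorem dir_left (bi bj : Int) : get_direction (bi, bj) (bi, bj - 1) = "left" := by
  unfold get_direction
  rw [if_neg (by simp), if_neg (by simp), if_neg (by simp), if_pos (by simp)]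

theorem dir_right (bi bj : Int) : get_direction (bi, bj) (bi, bj + 1) = "right" := by
  unfold get_direction
  rw [if_neg (by simp), if_neg (by simp), if_pos (by simp)]

theorem dir_down (bi bj : Int) : get_direction (bi, bj) (bi + 1, bj) = "down" := by
  unfold get_direction
  rw [if_pos (by simp)]

-- adjacency at the three relevant rows
theorem adj_up (bi bj j : Int) : is_adjacent (bi, bj) (bi - 1, j) = decide (j = bj) := by
  rw [Bool.eq_iff_iff]
  simp only [is_adjacent, beq_iff_eq, decide_eq_true_eq]
  omega

theorem adj_mid (bi bj j : Int) :
    is_adjacent (bi, bj) (bi, j) = (decide (j = bj - 1) || decide (j = bj + 1)) := by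
  rw [Bool.eq_iff_iff]
  simp only [is_adjacent, beq_iff_eq, Bool.or_eq_true, decide_eq_true_eq]
  omega

theorem adj_down (bi bj j : Int) : is_adjacent (bi, bj) (bi + 1, j) = decide (j = bj) := by
  rw [Bool.eq_iff_iff]
  simp only [is_adjacent, beq_iff_eq, decide_eq_true_eq]
  omega

theorem adj_far (bi bj i j : Int) (h : i ≠ bi - 1 ∧ i ≠ bi ∧ i ≠ bi + 1) :
    is_adjacent (bi, bj) (i, j) = false := by
  simp only [is_adjacent, beq_eq_false_iff_ne]
  omega

theorem one_if (C : Prop) [Decidable C] (g : Bool) (X : List String) (h : g = true ↔ C) :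
    (if C then X else []) = (if g = true then X else []) := by
  by_cases h1 : C <;> simp [h1, h]

theorem filtermap4 {α : Type} (p : α → Bool) (f : α → String) (a b c d : α) :
    (([a, b, c, d].filter p).map f)
      = (if p a = true then [f a] else []) ++ (if p b = true then [f b] else [])
        ++ (if p c = true then [f c] else []) ++ (if p d = true then [f d] else []) := by
  by_cases h1 : p a = true <;> by_cases h2 : p b = true <;> by_cases h3 : p c = true
    <;> by_cases h4 : p d = true <;> simp [h1, h2, h3, h4]

-- the double scan of A, run with the blank at (ki, kj), equals B's four-neighbour fold
theorem main_eval (grid : List (List String)) (ki kj : Nat) (row : List String)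
    (hrow : grid[ki]? = some row) :
    (PySem.List.pyRange 0 (grid.length : Int)).foldl
      (fun acc i =>
        (PySem.List.pyRange 0 ((PySem.List.pyGetD grid i []).length : Int)).foldl
          (fun acc2 j =>
            if PySem.List.pyGetD (PySem.List.pyGetD grid i []) j "" ≠ "b" then
              if is_adjacent ((ki : Int), (kj : Int)) (i, j) then
                acc2 ++ [get_direction ((ki : Int), (kj : Int)) (i, j)]
              else acc2
            else acc2) acc) []
      = [("up", (ki : Int) - 1, (kj : Int)), ("left", (ki : Int), (kj : Int) - 1),
         ("right", (ki : Int), (kj : Int) + 1), ("down", (ki : Int) + 1, (kj : Int))].foldl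
          (fun acc m => if neighbor_ok grid m.2.1 m.2.2 = true then acc ++ [m.1] else acc) [] := by
  have hkiN : ki < grid.length := (List.getElem?_eq_some_iff.mp hrow).1
  have hkiN' : ((ki : Nat) : Int) < (grid.length : Int) := by exact_mod_cast hkiN
  have hki0 : (0 : Int) ≤ (ki : Int) := by positivity
  -- A: inner loop to filter+map
  have hinner : ∀ (i : Int) (acc : List String),
      (PySem.List.pyRange 0 ((PySem.List.pyGetD grid i []).length : Int)).foldl
        (fun acc2 j =>
          if PySem.List.pyGetD (PySem.List.pyGetD grid i []) j "" ≠ "b" then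
            if is_adjacent ((ki : Int), (kj : Int)) (i, j) then
              acc2 ++ [get_direction ((ki : Int), (kj : Int)) (i, j)]
            else acc2
          else acc2) acc
      = acc ++ ((PySem.List.pyRange 0 ((PySem.List.pyGetD grid i []).length : Int)).filter
            (fun j => decide (PySem.List.pyGetD (PySem.List.pyGetD grid i []) j "" ≠ "b")
              && is_adjacent ((ki : Int), (kj : Int)) (i, j))).map
          (fun j => get_direction ((ki : Int), (kj : Int)) (i, j)) := by
    intro i acc
    have hb : (fun (acc2 : List String) (j : Int) =>
        if PySem.List.pyGetD (PySem.List.pyGetD grid i []) j "" ≠ "b" then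
          if is_adjacent ((ki : Int), (kj : Int)) (i, j) then
            acc2 ++ [get_direction ((ki : Int), (kj : Int)) (i, j)]
          else acc2
        else acc2)
        = (fun acc2 j =>
            if (decide (PySem.List.pyGetD (PySem.List.pyGetD grid i []) j "" ≠ "b")
                && is_adjacent ((ki : Int), (kj : Int)) (i, j)) = true then
              acc2 ++ [get_direction ((ki : Int), (kj : Int)) (i, j)]
            else acc2) := by
      funext acc2 j
      by_cases h1 : PySem.List.pyGetD (PySem.List.pyGetD grid i []) j "" ≠ "b"
      · by_cases h2 : is_adjacent ((ki : Int), (kj : Int)) (i, j) = true <;> simp [h1, h2]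
      · simp [h1]
    rw [hb, PySem.List.foldl_append_if]
  -- A: outer loop to flatMap
  have houter : (PySem.List.pyRange 0 (grid.length : Int)).foldl
      (fun acc i =>
        (PySem.List.pyRange 0 ((PySem.List.pyGetD grid i []).length : Int)).foldl
          (fun acc2 j =>
            if PySem.List.pyGetD (PySem.List.pyGetD grid i []) j "" ≠ "b" then
              if is_adjacent ((ki : Int), (kj : Int)) (i, j) then
                acc2 ++ [get_direction ((ki : Int), (kj : Int)) (i, j)]
              else acc2
            else acc2) acc) []
      = (PySem.List.pyRange 0 (grid.length : Int)).flatMap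
          (fun i => ((PySem.List.pyRange 0 ((PySem.List.pyGetD grid i []).length : Int)).filter
              (fun j => decide (PySem.List.pyGetD (PySem.List.pyGetD grid i []) j "" ≠ "b")
                && is_adjacent ((ki : Int), (kj : Int)) (i, j))).map
            (fun j => get_direction ((ki : Int), (kj : Int)) (i, j))) := by
    have hb : (fun (acc : List String) (i : Int) =>
        (PySem.List.pyRange 0 ((PySem.List.pyGetD grid i []).length : Int)).foldl
          (fun acc2 j =>
            if PySem.List.pyGetD (PySem.List.pyGetD grid i []) j "" ≠ "b" then
              if is_adjacent ((ki : Int), (kj : Int)) (i, j) then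
                acc2 ++ [get_direction ((ki : Int), (kj : Int)) (i, j)]
              else acc2
            else acc2) acc)
        = (fun acc i => acc ++ ((PySem.List.pyRange 0 ((PySem.List.pyGetD grid i []).length : Int)).filter
              (fun j => decide (PySem.List.pyGetD (PySem.List.pyGetD grid i []) j "" ≠ "b")
                && is_adjacent ((ki : Int), (kj : Int)) (i, j))).map
            (fun j => get_direction ((ki : Int), (kj : Int)) (i, j))) := by
      funext acc i
      exact hinner i acc
    rw [hb, PySem.List.foldl_append_eq_flatMap]
    simp
  rw [houter]
  -- split the flatMap into the three rows around the blank
  rw [flatMap_range_three _ (ki : Int) (by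
    intro i hi0 h1 h2 h3
    rw [List.map_eq_nil_iff, List.filter_eq_nil_iff]
    intro j _
    rw [adj_far (ki : Int) (kj : Int) i j ⟨h1, h2, h3⟩]
    simp) grid.length]
  -- evaluate each of the three rows
  -- row above
  have hup : ((PySem.List.pyRange 0 ((PySem.List.pyGetD grid ((ki : Int) - 1) []).length : Int)).filter
        (fun j => decide (PySem.List.pyGetD (PySem.List.pyGetD grid ((ki : Int) - 1) []) j "" ≠ "b")
          && is_adjacent ((ki : Int), (kj : Int)) ((ki : Int) - 1, j)))
      = if 0 ≤ (kj : Int) ∧ (kj : Int) < ((PySem.List.pyGetD grid ((ki : Int) - 1) []).length : Int)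
            ∧ decide (PySem.List.pyGetD (PySem.List.pyGetD grid ((ki : Int) - 1) []) (kj : Int) "" ≠ "b") = true
          then [(kj : Int)] else [] := by
    rw [List.filter_congr (fun j _ => by
      rw [adj_up (ki : Int) (kj : Int) j, Bool.and_comm])]
    exact filter_range_single (kj : Int) _ _
  -- blank's own row
  have hmid : ((PySem.List.pyRange 0 ((PySem.List.pyGetD grid (ki : Int) []).length : Int)).filter
        (fun j => decide (PySem.List.pyGetD (PySem.List.pyGetD grid (ki : Int) []) j "" ≠ "b")
          && is_adjacent ((ki : Int), (kj : Int)) ((ki : Int), j)))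
      = (if 0 ≤ (kj : Int) - 1 ∧ (kj : Int) - 1 < ((PySem.List.pyGetD grid (ki : Int) []).length : Int)
            ∧ decide (PySem.List.pyGetD (PySem.List.pyGetD grid (ki : Int) []) ((kj : Int) - 1) "" ≠ "b") = true
          then [(kj : Int) - 1] else [])
        ++ (if 0 ≤ (kj : Int) + 1 ∧ (kj : Int) + 1 < ((PySem.List.pyGetD grid (ki : Int) []).length : Int)
            ∧ decide (PySem.List.pyGetD (PySem.List.pyGetD grid (ki : Int) []) ((kj : Int) + 1) "" ≠ "b") = true
          then [(kj : Int) + 1] else []) := by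
    rw [List.filter_congr (fun j _ => by
      rw [adj_mid (ki : Int) (kj : Int) j, Bool.and_comm])]
    exact filter_range_pair ((kj : Int) - 1) ((kj : Int) + 1) (by omega) _ _
  -- row below
  have hdown : ((PySem.List.pyRange 0 ((PySem.List.pyGetD grid ((ki : Int) + 1) []).length : Int)).filter
        (fun j => decide (PySem.List.pyGetD (PySem.List.pyGetD grid ((ki : Int) + 1) []) j "" ≠ "b")
          && is_adjacent ((ki : Int), (kj : Int)) ((ki : Int) + 1, j)))
      = if 0 ≤ (kj : Int) ∧ (kj : Int) < ((PySem.List.pyGetD grid ((ki : Int) + 1) []).length : Int)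
            ∧ decide (PySem.List.pyGetD (PySem.List.pyGetD grid ((ki : Int) + 1) []) (kj : Int) "" ≠ "b") = true
          then [(kj : Int)] else [] := by
    rw [List.filter_congr (fun j _ => by
      rw [adj_down (ki : Int) (kj : Int) j, Bool.and_comm])]
    exact filter_range_single (kj : Int) _ _
  rw [hup, hmid, hdown]
  -- B: four-element fold to four blocks
  rw [PySem.List.foldl_append_if (fun (m : String × Int × Int) => neighbor_ok grid m.2.1 m.2.2) (fun (m : String × Int × Int) => m.1)]
  rw [List.nil_append, filtermap4]
  -- middle outer guard is satisfied
  rw [if_pos (⟨hki0, hkiN'⟩ : 0 ≤ (ki : Int) ∧ (ki : Int) < (grid.length : Int))]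
  -- push map over the ifs and appends
  rw [List.map_append, apply_ite (List.map _), apply_ite (List.map _), apply_ite (List.map _),
      apply_ite (List.map _)]
  simp only [List.map_cons, List.map_nil]
  rw [dir_up, dir_left, dir_right, dir_down]
  -- match each block's guard with neighbor_ok
  rw [two_if _ _ (neighbor_ok grid ((ki : Int) - 1) (kj : Int)) ["up"] (by
    rw [neighbor_ok_iff]
    simp only [decide_eq_true_eq]
    tauto)]
  rw [two_if _ _ (neighbor_ok grid ((ki : Int) + 1) (kj : Int)) ["down"] (by
    rw [neighbor_ok_iff]
    simp only [decide_eq_true_eq]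
    tauto)]
  rw [one_if _ (neighbor_ok grid (ki : Int) ((kj : Int) - 1)) ["left"] (by
    rw [neighbor_ok_iff]
    simp only [decide_eq_true_eq]
    constructor
    · rintro ⟨-, -, a, b, c⟩; exact ⟨a, b, c⟩
    · rintro ⟨a, b, c⟩; exact ⟨hki0, hkiN', a, b, c⟩)]
  rw [one_if _ (neighbor_ok grid (ki : Int) ((kj : Int) + 1)) ["right"] (by
    rw [neighbor_ok_iff]
    simp only [decide_eq_true_eq]
    constructor
    · rintro ⟨-, -, a, b, c⟩; exact ⟨a, b, c⟩
    · rintro ⟨a, b, c⟩; exact ⟨hki0, hkiN', a, b, c⟩)]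
  simp [List.append_assoc]

-- ===== VERDICT (by name: the statement is the Claim_ definition above) =====
theorem check_legal_moves_spec : Claim_equal_check_legal_moves := by
  intro grid _hdom hpre
  unfold Spec_check_legal_moves
  unfold Pre_check_legal_moves at hpre
  obtain ⟨⟨bi, bj⟩, hfb⟩ := Option.isSome_iff_exists.mp (find_blank_isSome grid hpre 0)
  have hfb0 : find_blank grid ((0 : Nat) : Int) = some (bi, bj) := by simpa using hfb
  obtain ⟨ki, kj, row, hrow, hbi, hbj, hidx⟩ := find_blank_shape grid 0 bi bj hfb0
  have hbi' : bi = (ki : Int) := by rw [hbi]; norm_num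
  unfold check_legal_moves check_legal_moves_alt
  rw [find_eq, hfb, hbi', hbj]
  exact main_eval grid ki kj row hrow
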